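-- pv_equiv track=rewrite | github.com/sergiomauz/Microverse-Coding-Challenges | Mandatory/003 - Anagram/anagram.py | anagram
-- ===== SOURCE A (Python) =====
-- def anagram(s):
--   arrayEvalChars = list(s)
--   lengthString = len(arrayEvalChars)
--
--   count = -1
--   if lengthString % 2 == 0:
--     s1 = arrayEvalChars[:(lengthString // 2)]
--     s2 = arrayEvalChars[(lengthString // 2):]
--
--     for char in s1:
--       try:
--         indexOfChar = s2.index(char)
--       except ValueError:
--         indexOfChar = -1
--
--       if indexOfChar > -1:
--         s2.remove(char)
--
--     count = len(s2)
--
--   return count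
-- ===== SOURCE B (Python) =====
-- def anagram(s):
--   cs = list(s)
--   n = len(cs)
--   if n % 2 != 0:
--     return -1
--   half = n // 2
--   counts = {}
--   for ch in cs[:half]:
--     counts[ch] = counts.get(ch, 0) + 1
--   missing = 0
--   for ch in cs[half:]:
--     c = counts.get(ch, 0)
--     if c > 0:
--       counts[ch] = c - 1
--     else:
--       missing += 1
--   return missing
-- ===== Notes on version B (the rewrite author's own statement) =====
-- stated objective: faster
-- what changed: Replaces the quadratic per-character index/remove scan of the second half with a single-pass character counter built from the first half, counting unmatched second-half characters directly.
import Mathlib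
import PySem

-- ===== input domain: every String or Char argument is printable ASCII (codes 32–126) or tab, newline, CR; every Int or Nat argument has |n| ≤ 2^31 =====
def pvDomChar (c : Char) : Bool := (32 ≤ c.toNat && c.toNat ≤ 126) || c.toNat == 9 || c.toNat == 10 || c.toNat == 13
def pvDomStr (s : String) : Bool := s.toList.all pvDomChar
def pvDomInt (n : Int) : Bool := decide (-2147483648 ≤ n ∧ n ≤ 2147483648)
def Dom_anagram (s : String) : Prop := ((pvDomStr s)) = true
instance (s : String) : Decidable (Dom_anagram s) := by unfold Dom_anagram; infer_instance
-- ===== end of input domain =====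

-- B replaces A's per-character index/remove scan of the second half with a one-pass character counter (faster).


-- ===== PORT A =====
-- try/except around s2.index(char): index? gives some k, and none exactly where Python raises ValueError (→ -1)
def anagramLoopStep (t : List Char) (char : Char) : List Char :=
  let indexOfChar : Int :=
    match PySem.List.index? t char with
    | some k => (k : Int)
    | none => -1
  if indexOfChar > -1 then (PySem.List.remove? t char).getD t else t

def anagram (s : String) : Int :=
  let arrayEvalChars := s.toList
  let lengthString := arrayEvalChars.length
  if lengthString % 2 == 0 then
    let s1 := PySem.List.slice arrayEvalChars none (some ((lengthString / 2 : Nat) : Int))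
    let s2 := PySem.List.slice arrayEvalChars (some ((lengthString / 2 : Nat) : Int)) none
    let s2' := s1.foldl anagramLoopStep s2
    (s2'.length : Int)
  else (-1)

-- ===== PORT B =====
def anagramAltStep (p : PySem.Dict Char Int × Int) (ch : Char) : PySem.Dict Char Int × Int :=
  let c := p.1.getD ch 0
  if c > 0 then (p.1.insert ch (c - 1), p.2) else (p.1, p.2 + 1)

def anagram_alt (s : String) : Int :=
  let cs := s.toList
  let n := cs.length
  if n % 2 != 0 then (-1)
  else
    let half := n / 2
    let counts := (PySem.List.slice cs none (some ((half : Nat) : Int))).foldl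
        (fun d ch => d.insert ch (d.getD ch 0 + 1)) PySem.Dict.empty
    let r := (PySem.List.slice cs (some ((half : Nat) : Int)) none).foldl anagramAltStep (counts, 0)
    r.2

-- ===== PRECONDITION & SPEC =====
def Spec_anagram (s : String) (out : Int) : Prop := out = anagram_alt s
instance (s : String) (out : Int) : Decidable (Spec_anagram s out) := by unfold Spec_anagram; infer_instance

-- ===== CLAIM (what is proved, stated in full; the proofs are below) =====
def Claim_equal_anagram : Prop := ∀ (s : String), Dom_anagram s → Spec_anagram s (anagram s)

-- ===== LEMMAS AND PROOFS =====

-- A's body per character of s1: remove the first occurrence from s2 if present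
theorem anagramLoopStep_eq (t : List Char) (c : Char) :
    anagramLoopStep t c = if c ∈ t then t.erase c else t := by
  unfold anagramLoopStep
  cases hidx : PySem.List.index? t c with
  | none =>
    have hmem : c ∉ t := (PySem.List.index?_eq_none_iff t c).mp hidx
    simp [hmem]
  | some k =>
    have hmem : c ∈ t := by
      by_contra hmem
      rw [(PySem.List.index?_eq_none_iff t c).mpr hmem] at hidx
      cases hidx
    simp only
    rw [PySem.List.remove?_eq_some_erase t c hmem]
    have hk : ((k : Int) > -1) := by omega
    simp [hk, hmem]

-- A's whole loop leaves exactly the multiset difference s2 - s1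
theorem anagram_loop_multiset (s1 : List Char) (t : List Char) :
    ((s1.foldl anagramLoopStep t : List Char) : Multiset Char)
      = (t : Multiset Char) - (s1 : Multiset Char) := by
  induction s1 generalizing t with
  | nil => simp
  | cons c cs ih =>
    rw [List.foldl_cons, ih, anagramLoopStep_eq,
        show ((c :: cs : List Char) : Multiset Char) = c ::ₘ (cs : Multiset Char) from rfl,
        Multiset.sub_cons]
    by_cases h : c ∈ t
    · simp [h]
    · simp [h]

-- B's second loop counts exactly the chars of s2 not available in the counter
theorem anagram_alt_loop (s2 : List Char) (d : PySem.Dict Char Int) (m : Multiset Char) (acc : Int)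
    (h : ∀ c, d.getD c 0 = (m.count c : Int)) :
    (s2.foldl anagramAltStep (d, acc)).2 = acc + (((s2 : Multiset Char) - m).card : Int) := by
  induction s2 generalizing d m acc with
  | nil => simp
  | cons c cs ih =>
    have hcoe : ((c :: cs : List Char) : Multiset Char) = c ::ₘ (cs : Multiset Char) := rfl
    simp only [List.foldl_cons, anagramAltStep]
    by_cases hc : c ∈ m
    · have hcnt : 1 ≤ m.count c := Multiset.one_le_count_iff_mem.mpr hc
      have hpos : (0 : Int) < d.getD c 0 := by rw [h c]; exact_mod_cast hcnt
      rw [if_pos hpos]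
      have hsub : (c ::ₘ (cs : Multiset Char)) - m = (cs : Multiset Char) - m.erase c := by
        ext x
        by_cases hx : x = c
        · subst hx
          simp only [Multiset.count_sub, Multiset.count_cons_self, Multiset.count_erase_self]
          omega
        · simp only [Multiset.count_sub, Multiset.count_cons_of_ne hx,
            Multiset.count_erase_of_ne hx]
      rw [ih _ (m.erase c) acc ?_, hcoe, hsub]
      intro x
      by_cases hx : x = c
      · subst hx
        rw [PySem.Dict.getD_insert_self, h x, Multiset.count_erase_self]
        push_cast [hcnt]; ring
      · rw [PySem.Dict.getD_insert, if_neg hx, h x, Multiset.count_erase_of_ne hx]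
    · have hz : d.getD c 0 = 0 := by
        rw [h c, Multiset.count_eq_zero_of_notMem hc]; rfl
      rw [if_neg (by rw [hz]; omega)]
      rw [ih _ m (acc + 1) h, hcoe]
      have hsub : (c ::ₘ (cs : Multiset Char)) - m = c ::ₘ ((cs : Multiset Char) - m) := by
        ext x
        by_cases hx : x = c
        · subst hx
          simp only [Multiset.count_sub, Multiset.count_cons_self,
            Multiset.count_eq_zero_of_notMem hc]
          omega
        · simp only [Multiset.count_sub, Multiset.count_cons_of_ne hx]
      rw [hsub]
      push_cast [Multiset.card_cons]; ring

-- ===== VERDICT (by name: the statement is the Claim_ definition above) =====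
theorem anagram_spec : Claim_equal_anagram := by
  intro s _
  unfold Spec_anagram anagram anagram_alt
  simp only [PySem.List.slice_to_natCast, PySem.List.slice_from_natCast]
  set cs := s.toList with hcs
  by_cases hpar : cs.length % 2 = 0
  · simp only [hpar, beq_self_eq_true, if_true]
    rw [if_neg (by simp)]
    have hA := anagram_loop_multiset (cs.take (cs.length / 2)) (cs.drop (cs.length / 2))
    have hB := anagram_alt_loop (cs.drop (cs.length / 2))
        ((cs.take (cs.length / 2)).foldl (fun d ch => d.insert ch (d.getD ch 0 + 1)) PySem.Dict.empty)
        ((cs.take (cs.length / 2) : List Char) : Multiset Char) 0 ?_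
    · rw [hB, ← hA]
      simp [Multiset.coe_card]
    · intro x
      rw [PySem.Dict.getD_foldl_insert_add_one]
      simp [PySem.Dict.getD_empty, Multiset.coe_count]
  · rw [if_neg (by simpa using hpar), if_pos (by simpa using hpar)]
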